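-- pv_equiv track=rewrite | github.com/li563042811/Job_test | Yi_Sleep.py | MaxInterest
-- ===== SOURCE A (Python) =====
-- def CalInterest(score=[],sleep=[]):
--     result = 0
--     for i in range(len(sleep)):
--         if sleep[i] == 1:
--             result += score[i]
--     return result
--
-- def MaxInterest(n,k,score=[],sleep=[]):
--     InterestScore = []
--     temp = []
--     for i in range(n-k+1):
--         for j in range(k):
--             temp.append(sleep[i+j])
--             sleep[i+j]=1
--         InterestScore.append(CalInterest(score,sleep))
--         for m in range(k):
--             sleep[i+m]=temp[m]
--         temp = []
--     return max(InterestScore)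
-- ===== SOURCE B (Python) =====
-- def MaxInterest(n, k, score=[], sleep=[]):
--     # Fixed part: segments already awake contribute regardless of the window.
--     base = sum(s for s, sl in zip(score, sleep) if sl == 1)
--     if k <= 0:
--         return base
--     # Extra interest gained by waking index j (0 if already awake).
--     gain = [score[j] if sleep[j] != 1 else 0 for j in range(n)]
--     cur = sum(gain[:k])
--     best = cur
--     for i in range(1, n - k + 1):
--         cur += gain[i + k - 1] - gain[i - 1]
--         best = max(best, cur)
--     return base + best
-- ===== Notes on version B (the rewrite author's own statement) =====
-- stated objective: faster
-- what changed: Instead of rewriting the k-window of sleep to 1, recomputing the full interest sum and restoring the window for every window position, B computes the fixed base sum once and slides an O(1)-update window over the per-index wake-up gains score[j]*(sleep[j]!=1).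
import Mathlib
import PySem

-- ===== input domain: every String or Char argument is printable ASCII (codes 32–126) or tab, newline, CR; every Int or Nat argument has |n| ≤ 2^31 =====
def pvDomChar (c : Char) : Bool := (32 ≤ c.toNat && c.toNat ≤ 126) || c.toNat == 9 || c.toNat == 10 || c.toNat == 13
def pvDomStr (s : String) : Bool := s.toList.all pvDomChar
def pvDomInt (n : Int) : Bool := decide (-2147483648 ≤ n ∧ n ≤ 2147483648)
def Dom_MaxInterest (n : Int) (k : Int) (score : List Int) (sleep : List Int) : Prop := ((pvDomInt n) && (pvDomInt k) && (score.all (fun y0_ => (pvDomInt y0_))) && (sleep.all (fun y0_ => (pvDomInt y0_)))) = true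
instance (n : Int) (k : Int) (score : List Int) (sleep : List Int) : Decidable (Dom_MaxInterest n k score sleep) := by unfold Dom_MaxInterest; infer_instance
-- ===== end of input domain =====

-- B replaces A's rebuild-the-whole-sum-per-window scan by a fixed base plus a sliding window over
-- per-index wake-up gains (objective: faster). A temporarily mutates `sleep` in place but restores
-- it before returning; B does not mutate (the equivalence is about the return value).

-- ===== PORT A =====
def CalInterest (score : List Int) (sleep : List Int) : Int :=
  (PySem.List.pyRange 0 (sleep.length : Int) 1).foldl
    (fun result i =>
      if PySem.List.pyGetD sleep i 0 == 1 then result + PySem.List.pyGetD score i 0 else result) 0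

def MaxInterest (n : Int) (k : Int) (score : List Int) (sleep : List Int) : Int :=
  let st :=
    (PySem.List.pyRange 0 (n - k + 1) 1).foldl
      (fun (st : List Int × List Int) i =>
        -- for j in range(k): temp.append(sleep[i+j]); sleep[i+j] = 1
        let inner :=
          (PySem.List.pyRange 0 k 1).foldl
            (fun (p : List Int × List Int) j =>
              (p.1 ++ [PySem.List.pyGetD p.2 (i + j) 0],
               PySem.List.pySetD p.2 (i + j) 1)) ([], st.2)
        -- InterestScore.append(CalInterest(score, sleep))
        let scores := st.1 ++ [CalInterest score inner.2]
        -- for m in range(k): sleep[i+m] = temp[m]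
        let restored :=
          (PySem.List.pyRange 0 k 1).foldl
            (fun sl m => PySem.List.pySetD sl (i + m) (PySem.List.pyGetD inner.1 m 0)) inner.2
        (scores, restored))
      ([], sleep)
  (PySem.List.max? st.1 (fun x => x)).getD 0   -- max(InterestScore); Pre_ makes the list nonempty

-- ===== PORT B =====
def MaxInterest_alt (n : Int) (k : Int) (score : List Int) (sleep : List Int) : Int :=
  let base := (score.zip sleep).foldl (fun r p => if p.2 == 1 then r + p.1 else r) 0
  if k ≤ 0 then base
  else
    let gain := (PySem.List.pyRange 0 n 1).map
      (fun j => if PySem.List.pyGetD sleep j 0 != 1 then PySem.List.pyGetD score j 0 else 0)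
    let cur0 := (PySem.List.slice gain none (some k)).sum
    let res := (PySem.List.pyRange 1 (n - k + 1) 1).foldl
      (fun (p : Int × Int) i =>
        (max p.1 (p.2 + PySem.List.pyGetD gain (i + k - 1) 0 - PySem.List.pyGetD gain (i - 1) 0),
         p.2 + PySem.List.pyGetD gain (i + k - 1) 0 - PySem.List.pyGetD gain (i - 1) 0))
      (cur0, cur0)
    base + res.1

-- ===== PRECONDITION & SPEC =====
-- Pre_ is exactly where the Python A returns normally: max() needs n-k+1 ≥ 1 (else ValueError), the
-- window loops index sleep[0..n-1] when k ≥ 1 (else IndexError), and CalInterest reads score[j] at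
-- every j that is awake (sleep[j]==1) or covered by some window (else IndexError).
def Pre_MaxInterest (n : Int) (k : Int) (score : List Int) (sleep : List Int) : Prop :=
  1 ≤ n - k + 1 ∧ (1 ≤ k → n ≤ (sleep.length : Int)) ∧
  (∀ j : Nat, j < sleep.length → (sleep.getD j 0 = 1 ∨ (1 ≤ k ∧ (j : Int) < n)) → j < score.length)
instance (n : Int) (k : Int) (score : List Int) (sleep : List Int) : Decidable (Pre_MaxInterest n k score sleep) := by unfold Pre_MaxInterest; infer_instance
def pvWitness_MaxInterest : Int × Int × List Int × List Int := (2, 1, [3, 4], [0, 1])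

def Spec_MaxInterest (n : Int) (k : Int) (score : List Int) (sleep : List Int) (out : Int) : Prop := out = MaxInterest_alt n k score sleep
instance (n : Int) (k : Int) (score : List Int) (sleep : List Int) (out : Int) : Decidable (Spec_MaxInterest n k score sleep out) := by unfold Spec_MaxInterest; infer_instance

-- ===== CLAIM (what is proved, stated in full; the proofs are below) =====
def Claim_equal_MaxInterest : Prop := ∀ (n : Int) (k : Int) (score : List Int) (sleep : List Int), Dom_MaxInterest n k score sleep → Pre_MaxInterest n k score sleep → Spec_MaxInterest n k score sleep (MaxInterest n k score sleep)

-- ===== LEMMAS AND PROOFS =====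

-- Per-index gain of waking index j (B's comprehension body).
def Gn (score sleep : List Int) (j : Int) : Int :=
  if PySem.List.pyGetD sleep j 0 != 1 then PySem.List.pyGetD score j 0 else 0

-- Window sum of gains over [i, i+k).
def Wn (score sleep : List Int) (k i : Int) : Int :=
  ((PySem.List.pyRange i (i + k) 1).map (Gn score sleep)).sum

-- Contribution of index j in CalInterest over sleep state sl.
def Hn (score sl : List Int) (j : Int) : Int :=
  if PySem.List.pyGetD sl j 0 == 1 then PySem.List.pyGetD score j 0 else 0

-- sleep with positions i, i+1, …, i+c-1 set to 1 (in that order).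
def setTo1 (sl : List Int) (i : Int) : Nat → List Int
  | 0 => sl
  | c + 1 => PySem.List.pySetD (setTo1 sl i c) (i + c) 1

theorem length_setTo1 (sl : List Int) (i : Int) (c : Nat) : (setTo1 sl i c).length = sl.length := by
  induction c with
  | zero => rfl
  | succ c ih => simp [setTo1, PySem.List.length_pySetD, ih]

theorem getD_setTo1 (sl : List Int) (i : Int) (c : Nat) (h0 : 0 ≤ i)
    (h1 : i + (c : Int) ≤ (sl.length : Int)) (m : Int) (hm : 0 ≤ m) :
    PySem.List.pyGetD (setTo1 sl i c) m 0 =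
      if i ≤ m ∧ m < i + (c : Int) then 1 else PySem.List.pyGetD sl m 0 := by
  induction c with
  | zero => rw [if_neg (by push_cast; omega)]; rfl
  | succ c ih =>
    have hlen : ((i + (c : Int)).toNat) < (setTo1 sl i c).length := by
      rw [length_setTo1]; push_cast at h1; omega
    have hcast : (i + (c : Int)) = (((i + (c : Int)).toNat : Nat) : Int) := by omega
    have hmcast : m = ((m.toNat : Nat) : Int) := by omega
    rw [setTo1, hcast, hmcast, PySem.List.pyGetD_pySetD_natCast _ _ _ _ _ hlen, ← hmcast]
    rw [ih (by push_cast at h1 ⊢; omega)]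
    by_cases h2 : m.toNat = (i + (c : Int)).toNat
    · rw [if_pos h2, if_pos (by push_cast; omega)]
    · rw [if_neg h2]
      push_cast
      split_ifs with ha hb
      · rfl
      · exfalso; omega
      · exfalso; omega
      · rfl

theorem listext (xs ys : List Int) (hl : xs.length = ys.length)
    (h : ∀ m : Nat, m < ys.length → PySem.List.pyGetD xs (m : Int) 0 = PySem.List.pyGetD ys (m : Int) 0) :
    xs = ys := by
  refine List.ext_getElem hl (fun m h1 h2 => ?_)
  have := h m h2
  rw [PySem.List.pyGetD_natCast, PySem.List.pyGetD_natCast,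
      List.getD_eq_getElem _ _ h1, List.getD_eq_getElem _ _ h2] at this
  exact this

-- pyGetD after pySetD, at nonnegative Int indices.
theorem pyGetD_pySetD_int (xs : List Int) (p m v : Int) (hp : 0 ≤ p)
    (hplen : p < (xs.length : Int)) (hm : 0 ≤ m) :
    PySem.List.pyGetD (PySem.List.pySetD xs p v) m 0 =
      if m = p then v else PySem.List.pyGetD xs m 0 := by
  have h1 : p = ((p.toNat : Nat) : Int) := by omega
  have h2 : m = ((m.toNat : Nat) : Int) := by omega
  rw [h1, h2, PySem.List.pyGetD_pySetD_natCast _ _ _ _ _ (by omega)]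
  split_ifs with ha hb
  · rfl
  · exfalso; omega
  · exfalso; omega
  · rfl

-- range(k) in A is the same as range(max(k,0)).
theorem pyRange_toNat (k : Int) :
    PySem.List.pyRange 0 k 1 = PySem.List.pyRange 0 ((k.toNat : Nat) : Int) 1 := by
  rcases le_or_gt 0 k with h | h
  · rw [Int.toNat_of_nonneg h]
  · rw [PySem.List.pyRange_one_eq_nil (by omega), PySem.List.pyRange_one_eq_nil (by omega)]

-- CalInterest as a sum over indices.
theorem calInterest_eq_sum (score sl : List Int) :
    CalInterest score sl = ((PySem.List.pyRange 0 (sl.length : Int) 1).map (Hn score sl)).sum := by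
  unfold CalInterest
  have hf : (fun (result : Int) (i : Int) =>
      if PySem.List.pyGetD sl i 0 == 1 then result + PySem.List.pyGetD score i 0 else result)
      = fun result i => result + Hn score sl i := by
    funext r i; unfold Hn; split_ifs <;> simp
  rw [hf, PySem.List.foldl_add]
  simp

-- A's inner window fold: records the old values and sets the window to 1.
theorem inner_fold_eq (sl : List Int) (i : Int) (c : Nat) (h0 : 0 ≤ i)
    (h1 : 0 < c → i + (c : Int) ≤ (sl.length : Int)) :
    (PySem.List.pyRange 0 (c : Int) 1).foldl
      (fun (p : List Int × List Int) j =>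
        (p.1 ++ [PySem.List.pyGetD p.2 (i + j) 0], PySem.List.pySetD p.2 (i + j) 1)) ([], sl)
    = ((PySem.List.pyRange 0 (c : Int) 1).map (fun j => PySem.List.pyGetD sl (i + j) 0), setTo1 sl i c) := by
  induction c with
  | zero =>
    norm_num [PySem.List.pyRange_one_eq_nil (le_refl (0 : Int)), setTo1]
  | succ c ih =>
    have hb : i + ((c + 1 : Nat) : Int) ≤ (sl.length : Int) := h1 (Nat.succ_pos c)
    have hc : ((c + 1 : Nat) : Int) = (c : Int) + 1 := by push_cast; ring
    rw [hc] at hb ⊢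
    rw [PySem.List.pyRange_one_succ_right (by omega), List.foldl_append, List.map_append]
    rw [ih (fun _ => by omega)]
    simp only [List.foldl_cons, List.foldl_nil, List.map_cons, List.map_nil]
    rw [getD_setTo1 sl i c h0 (by omega) (i + (c : Int)) (by omega)]
    rw [if_neg (by omega)]
    rfl

-- one restore step: writing back the old value shrinks the still-set window by one
theorem setTo1_restore_step (sl : List Int) (p : Int) (e : Nat) (hp : 0 ≤ p)
    (he : 1 ≤ e) (hlen : p + (e : Int) ≤ (sl.length : Int)) :
    PySem.List.pySetD (setTo1 sl p e) p (PySem.List.pyGetD sl p 0) = setTo1 sl (p + 1) (e - 1) := by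
  apply listext
  · rw [PySem.List.length_pySetD, length_setTo1, length_setTo1]
  · intro m hm
    rw [length_setTo1] at hm
    rw [pyGetD_pySetD_int _ _ _ _ hp (by rw [length_setTo1]; omega) (by omega)]
    rw [getD_setTo1 sl p e hp hlen (m : Int) (by omega)]
    rw [getD_setTo1 sl (p + 1) (e - 1) (by omega) (by omega) (m : Int) (by omega)]
    by_cases h2 : (m : Int) = p
    · rw [if_pos h2, if_neg (by omega), h2]
    · rw [if_neg h2]
      split_ifs with ha hb
      · rfl
      · exfalso; omega
      · exfalso; omega
      · rfl

-- A's restore fold undoes the window writes.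
theorem restore_fold_eq (sl : List Int) (i : Int) (c : Nat) (h0 : 0 ≤ i)
    (h1 : 0 < c → i + (c : Int) ≤ (sl.length : Int)) :
    (PySem.List.pyRange 0 (c : Int) 1).foldl
      (fun s m => PySem.List.pySetD s (i + m)
        (PySem.List.pyGetD ((PySem.List.pyRange 0 (c : Int) 1).map (fun j => PySem.List.pyGetD sl (i + j) 0)) m 0))
      (setTo1 sl i c)
    = sl := by
  rcases Nat.eq_zero_or_pos c with hc0 | hcpos
  · subst hc0
    norm_num [PySem.List.pyRange_one_eq_nil (le_refl (0 : Int)), setTo1]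
  have hlen := h1 hcpos
  have H : ∀ d : Nat, d ≤ c →
      (PySem.List.pyRange 0 (d : Int) 1).foldl
        (fun s m => PySem.List.pySetD s (i + m)
          (PySem.List.pyGetD ((PySem.List.pyRange 0 (c : Int) 1).map (fun j => PySem.List.pyGetD sl (i + j) 0)) m 0))
        (setTo1 sl i c)
      = setTo1 sl (i + (d : Int)) (c - d) := by
    intro d
    induction d with
    | zero =>
      intro _
      norm_num [PySem.List.pyRange_one_eq_nil (le_refl (0 : Int))]
    | succ d ih =>
      intro hd
      have hc : ((d + 1 : Nat) : Int) = (d : Int) + 1 := by push_cast; ring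
      rw [hc, PySem.List.pyRange_one_succ_right (by omega), List.foldl_append]
      rw [ih (by omega)]
      simp only [List.foldl_cons, List.foldl_nil]
      rw [PySem.List.pyGetD_map_pyRange_of_nonneg _ _ _ _ (by omega) (by omega)]
      rw [setTo1_restore_step sl (i + (d : Int)) (c - d) (by omega) (by omega)
            (by omega)]
      congr 1
      all_goals omega
  have := H c le_rfl
  rw [this]
  norm_num [setTo1]

-- CalInterest on the window-set state = CalInterest on sleep + window gain.
theorem calInterest_setTo1 (score sleep : List Int) (k i : Int) (h0 : 0 ≤ i)
    (h1 : 1 ≤ k → i + k ≤ (sleep.length : Int)) :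
    CalInterest score (setTo1 sleep i k.toNat) = CalInterest score sleep + Wn score sleep k i := by
  rcases le_or_gt k 0 with hk | hk
  · have hz : k.toNat = 0 := by omega
    rw [hz]
    unfold Wn
    rw [PySem.List.pyRange_one_eq_nil (by omega)]
    simp [setTo1]
  · have hik : i + k ≤ (sleep.length : Int) := h1 (by omega)
    have hkc : ((k.toNat : Nat) : Int) = k := by omega
    rw [calInterest_eq_sum, calInterest_eq_sum, length_setTo1]
    rw [PySem.List.pyRange_one_append 0 i (sleep.length : Int) (by omega) (by omega)]
    rw [PySem.List.pyRange_one_append i (i + k) (sleep.length : Int) (by omega) (by omega)]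
    simp only [List.map_append, List.sum_append]
    have e1 : List.map (Hn score (setTo1 sleep i k.toNat)) (PySem.List.pyRange 0 i 1)
        = List.map (Hn score sleep) (PySem.List.pyRange 0 i 1) := by
      refine List.map_congr_left (fun j hj => ?_)
      rw [PySem.List.mem_pyRange_one] at hj
      unfold Hn
      rw [getD_setTo1 sleep i k.toNat h0 (by rw [hkc]; omega) j (by omega),
        if_neg (show ¬(i ≤ j ∧ j < i + ((k.toNat : Nat) : Int)) by omega)]
    have e3 : List.map (Hn score (setTo1 sleep i k.toNat)) (PySem.List.pyRange (i + k) (sleep.length : Int) 1)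
        = List.map (Hn score sleep) (PySem.List.pyRange (i + k) (sleep.length : Int) 1) := by
      refine List.map_congr_left (fun j hj => ?_)
      rw [PySem.List.mem_pyRange_one] at hj
      unfold Hn
      rw [getD_setTo1 sleep i k.toNat h0 (by rw [hkc]; omega) j (by omega),
        if_neg (show ¬(i ≤ j ∧ j < i + ((k.toNat : Nat) : Int)) by omega)]
    have e2 : List.map (Hn score (setTo1 sleep i k.toNat)) (PySem.List.pyRange i (i + k) 1)
        = List.map (fun j => Hn score sleep j + Gn score sleep j) (PySem.List.pyRange i (i + k) 1) := by
      refine List.map_congr_left (fun j hj => ?_)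
      rw [PySem.List.mem_pyRange_one] at hj
      unfold Hn Gn
      rw [getD_setTo1 sleep i k.toNat h0 (by rw [hkc]; omega) j (by omega),
        if_pos (show i ≤ j ∧ j < i + ((k.toNat : Nat) : Int) by omega)]
      by_cases hs : PySem.List.pyGetD sleep j 0 = 1 <;> simp [hs]
    rw [e1, e2, e3, PySem.List.sum_map_add_int]
    unfold Wn
    ring

-- A's outer loop builds exactly [base + window-gain(i) for i in range(M)] and restores sleep.
theorem outer_fold_eq (score sleep : List Int) (n k : Int) (M : Nat)
    (hM : (M : Int) ≤ n - k + 1) (hnk : 1 ≤ k → n ≤ (sleep.length : Int)) :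
    (PySem.List.pyRange 0 ((M : Nat) : Int) 1).foldl
      (fun (st : List Int × List Int) i =>
        (st.1 ++ [CalInterest score ((PySem.List.pyRange 0 k 1).foldl
              (fun (p : List Int × List Int) j =>
                (p.1 ++ [PySem.List.pyGetD p.2 (i + j) 0], PySem.List.pySetD p.2 (i + j) 1)) ([], st.2)).2],
         (PySem.List.pyRange 0 k 1).foldl
            (fun sl m => PySem.List.pySetD sl (i + m)
              (PySem.List.pyGetD ((PySem.List.pyRange 0 k 1).foldl
                (fun (p : List Int × List Int) j =>
                  (p.1 ++ [PySem.List.pyGetD p.2 (i + j) 0], PySem.List.pySetD p.2 (i + j) 1)) ([], st.2)).1 m 0))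
            ((PySem.List.pyRange 0 k 1).foldl
              (fun (p : List Int × List Int) j =>
                (p.1 ++ [PySem.List.pyGetD p.2 (i + j) 0], PySem.List.pySetD p.2 (i + j) 1)) ([], st.2)).2))
      ([], sleep)
    = ((PySem.List.pyRange 0 ((M : Nat) : Int) 1).map
        (fun i => CalInterest score sleep + Wn score sleep k i), sleep) := by
  induction M with
  | zero => norm_num [PySem.List.pyRange_one_eq_nil (le_refl (0 : Int))]
  | succ M ih =>
    have hc : ((M + 1 : Nat) : Int) = (M : Int) + 1 := by push_cast; ring
    rw [hc, PySem.List.pyRange_one_succ_right (by omega), List.foldl_append, List.map_append]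
    rw [ih (by omega)]
    simp only [List.foldl_cons, List.foldl_nil, List.map_cons, List.map_nil]
    have hwin : 0 < k.toNat → (M : Int) + ((k.toNat : Nat) : Int) ≤ (sleep.length : Int) := by
      intro hpos
      have hk1 : 1 ≤ k := by omega
      have := hnk hk1
      push_cast at hc ⊢
      omega
    rw [pyRange_toNat k]
    rw [inner_fold_eq sleep (M : Int) k.toNat (by omega) hwin]
    simp only []
    rw [restore_fold_eq sleep (M : Int) k.toNat (by omega) hwin]
    rw [calInterest_setTo1 score sleep k (M : Int) (by omega)
          (fun hk1 => by have := hnk hk1; omega)]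

-- Hn at a Nat index, in getD form.
theorem hn_nat (score sleep : List Int) (j : Nat) :
    Hn score sleep ((j : Nat) : Int) = if sleep.getD j 0 == 1 then score.getD j 0 else 0 := by
  unfold Hn
  rw [PySem.List.pyGetD_natCast, PySem.List.pyGetD_natCast]

theorem sum_hn_eq_zip (sleep : List Int) : ∀ score : List Int,
    ((List.range sleep.length).map (fun j => if sleep.getD j 0 == 1 then score.getD j 0 else 0)).sum
    = ((score.zip sleep).map (fun p => if p.2 == 1 then p.1 else 0)).sum := by
  induction sleep with
  | nil => intro score; simp
  | cons a tl ih =>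
    intro score
    cases score with
    | nil => simp
    | cons s st =>
      simp only [List.length_cons, List.range_succ_eq_map, List.map_cons, List.map_map,
        List.sum_cons, List.zip_cons_cons, Function.comp_def, List.getD_cons_succ,
        List.getD_cons_zero]
      rw [ih st]

-- B's base loop equals CalInterest on the untouched sleep list.
theorem base_eq (score sleep : List Int) :
    (score.zip sleep).foldl (fun r p => if p.2 == 1 then r + p.1 else r) 0 = CalInterest score sleep := by
  have hf : (fun (r : Int) (p : Int × Int) => if p.2 == 1 then r + p.1 else r)
      = fun r p => r + (if p.2 == 1 then p.1 else 0) := by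
    funext r p; split_ifs <;> simp
  rw [hf, PySem.List.foldl_add, calInterest_eq_sum, PySem.List.pyRange_zero_nat, List.map_map]
  simp only [Function.comp_def, hn_nat]
  rw [sum_hn_eq_zip]
  simp

-- sliding-window recurrence for the window gain
theorem Wn_succ (score sleep : List Int) (k i : Int) (hk : 1 ≤ k) :
    Wn score sleep k (i + 1) = Wn score sleep k i + Gn score sleep (i + k) - Gn score sleep i := by
  unfold Wn
  rw [show i + 1 + k = (i + k) + 1 by ring]
  rw [PySem.List.pyRange_one_succ_right (show i + 1 ≤ i + k by omega)]
  rw [PySem.List.pyRange_one_cons (show i < i + k by omega)]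
  simp only [List.map_append, List.map_cons, List.map_nil, List.sum_append, List.sum_cons,
    List.sum_nil]
  ring

theorem foldl_max_map_add (l : List Int) (b a : Int) (f : Int → Int) :
    List.foldl max (b + a) (l.map (fun i => b + f i)) = b + List.foldl max a (l.map f) := by
  induction l generalizing a with
  | nil => simp
  | cons x t ih =>
    simp only [List.map_cons, List.foldl_cons]
    rw [max_add_add_left]
    exact ih _

theorem foldl_max_const (l : List Int) (b : Int) :
    List.foldl max b (l.map (fun _ => b)) = b := by
  induction l with
  | nil => rfl
  | cons x t ih => simpa [List.map_cons, List.foldl_cons, max_self] using ih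

-- B's sliding fold computes the running max of all window gains (and carries the current one).
theorem slide_aux (score sleep : List Int) (n k : Int) (hk : 1 ≤ k) (m : Nat)
    (hm : 1 + (m : Int) ≤ n - k + 1) :
    (PySem.List.pyRange 1 (1 + (m : Int)) 1).foldl
      (fun (p : Int × Int) i =>
        (max p.1 (p.2 + PySem.List.pyGetD ((PySem.List.pyRange 0 n 1).map (Gn score sleep)) (i + k - 1) 0
            - PySem.List.pyGetD ((PySem.List.pyRange 0 n 1).map (Gn score sleep)) (i - 1) 0),
         p.2 + PySem.List.pyGetD ((PySem.List.pyRange 0 n 1).map (Gn score sleep)) (i + k - 1) 0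
            - PySem.List.pyGetD ((PySem.List.pyRange 0 n 1).map (Gn score sleep)) (i - 1) 0))
      (Wn score sleep k 0, Wn score sleep k 0)
    = (List.foldl max (Wn score sleep k 0)
        ((PySem.List.pyRange 1 (1 + (m : Int)) 1).map (Wn score sleep k)),
       Wn score sleep k (m : Int)) := by
  induction m with
  | zero => norm_num [PySem.List.pyRange_one_eq_nil (le_refl (1 : Int))]
  | succ m ih =>
    have hc : (1 : Int) + ((m + 1 : Nat) : Int) = (1 + (m : Int)) + 1 := by push_cast; ring
    rw [hc, PySem.List.pyRange_one_succ_right (by omega), List.foldl_append, List.map_append,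
      List.foldl_append]
    rw [ih (by push_cast at hm ⊢; omega)]
    simp only [List.foldl_cons, List.foldl_nil, List.map_cons, List.map_nil]
    have g1 : PySem.List.pyGetD ((PySem.List.pyRange 0 n 1).map (Gn score sleep)) (1 + (m : Int) + k - 1) 0
        = Gn score sleep ((m : Int) + k) := by
      rw [show 1 + (m : Int) + k - 1 = (m : Int) + k by ring]
      exact PySem.List.pyGetD_map_pyRange_of_nonneg _ _ _ _ (by omega) (by push_cast at hm; omega)
    have g2 : PySem.List.pyGetD ((PySem.List.pyRange 0 n 1).map (Gn score sleep)) (1 + (m : Int) - 1) 0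
        = Gn score sleep (m : Int) := by
      rw [show 1 + (m : Int) - 1 = (m : Int) by ring]
      exact PySem.List.pyGetD_map_pyRange_of_nonneg _ _ _ _ (by omega) (by push_cast at hm; omega)
    rw [g1, g2]
    have hw : Wn score sleep k ((m : Int) + 1)
        = Wn score sleep k (m : Int) + Gn score sleep ((m : Int) + k) - Gn score sleep (m : Int) :=
      Wn_succ score sleep k (m : Int) hk
    rw [show ((m + 1 : Nat) : Int) = (m : Int) + 1 by push_cast; ring,
        show (1 : Int) + (m : Int) = (m : Int) + 1 by ring, hw]

-- ===== VERDICT (by name: the statement is the Claim_ definition above) =====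
theorem MaxInterest_spec : Claim_equal_MaxInterest := by
  intro n k score sleep _hdom hpre
  obtain ⟨hM1, hnk, _⟩ := hpre
  unfold Spec_MaxInterest
  have hMt : n - k + 1 = (((n - k + 1).toNat : Nat) : Int) := by omega
  simp only [MaxInterest]
  rw [hMt, outer_fold_eq score sleep n k (n - k + 1).toNat (by omega) hnk]
  simp only []
  rw [PySem.List.pyRange_one_cons (by omega : (0 : Int) < ((n - k + 1).toNat : Int)), zero_add,
    List.map_cons, PySem.List.max?_id_cons, Option.getD_some]
  simp only [MaxInterest_alt]
  rw [base_eq]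
  rcases le_or_gt k 0 with hk | hk
  · rw [if_pos hk]
    have hW : ∀ i : Int, Wn score sleep k i = 0 := by
      intro i
      unfold Wn
      rw [PySem.List.pyRange_one_eq_nil (by omega)]
      rfl
    have hmap : (PySem.List.pyRange 1 (((n - k + 1).toNat : Nat) : Int) 1).map
          (fun i => CalInterest score sleep + Wn score sleep k i)
        = (PySem.List.pyRange 1 (((n - k + 1).toNat : Nat) : Int) 1).map
          (fun _ => CalInterest score sleep) := by
      refine List.map_congr_left (fun i _ => ?_)
      rw [hW i, add_zero]
    rw [hW 0, add_zero, hmap, foldl_max_const]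
  · rw [if_neg (by omega)]
    have hgl : (fun j => if PySem.List.pyGetD sleep j 0 != 1 then PySem.List.pyGetD score j 0 else 0)
        = Gn score sleep := rfl
    rw [hgl]
    have hcur0 : (PySem.List.slice ((PySem.List.pyRange 0 n 1).map (Gn score sleep)) none (some k)).sum
        = Wn score sleep k 0 := by
      rw [PySem.List.slice_to _ (by omega : (0 : Int) ≤ k), ← List.map_take]
      rw [PySem.List.pyRange_one_append 0 k n (by omega) (by omega)]
      rw [show k.toNat = (PySem.List.pyRange 0 k 1).length by
            rw [PySem.List.length_pyRange_one]; omega]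
      rw [List.take_left]
      unfold Wn
      rw [zero_add]
    rw [hcur0]
    rw [show (((n - k + 1).toNat : Nat) : Int) = 1 + (((n - k).toNat : Nat) : Int) by omega]
    rw [show n - k + 1 = 1 + (((n - k).toNat : Nat) : Int) by omega]
    rw [slide_aux score sleep n k hk (n - k).toNat (by omega)]
    simp only []
    rw [foldl_max_map_add (PySem.List.pyRange 1 (1 + (((n - k).toNat : Nat) : Int)) 1)
          (CalInterest score sleep) (Wn score sleep k 0) (Wn score sleep k)]
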